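-- pv_equiv track=rewrite | github.com/kanchankjha/tools | fluxgen/fluxgen/identity.py | _mac_from_seed
-- ===== SOURCE A (Python) =====
-- from typing import Iterable, List, Optional, Set
--
-- def _mac_from_seed(seed: List[int], index: int) -> str:
--     """
--     Generate a MAC address by incrementing the seed by index.
--
--     Args:
--         seed: Base MAC address as list of 6 bytes
--         index: Offset to add to base MAC (0-based)
--
--     Returns:
--         MAC address string in format "xx:xx:xx:xx:xx:xx"
--     """
--     mac_bytes = seed[:]
--     mac_int = 0
--     for byte in mac_bytes:
--         mac_int = (mac_int << 8) | byte
--     mac_int = (mac_int + index + 1) % (1 << 48)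
--     mac = mac_int.to_bytes(6, "big")
--     return ":".join(f"{byte:02x}" for byte in mac)
-- ===== SOURCE B (Python) =====
-- def _mac_from_seed(seed, index):
--     v = 0
--     for b in seed:
--         v = (v << 8) | b
--     v = (v + index + 1) % (1 << 48)
--     s = f"{v:012x}"
--     return ":".join(s[i:i + 2] for i in range(0, 12, 2))
-- ===== Notes on version B (the rewrite author's own statement) =====
-- stated objective: alternative
-- what changed: B replaces A's int.to_bytes(6,'big') + per-byte '%02x' formatting + join-over-bytes rendering by a single zero-padded 12-hex-digit format of the 48-bit value sliced into two-character pairs, and accumulates directly over seed without A's defensive seed[:] copy.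
import Mathlib
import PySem

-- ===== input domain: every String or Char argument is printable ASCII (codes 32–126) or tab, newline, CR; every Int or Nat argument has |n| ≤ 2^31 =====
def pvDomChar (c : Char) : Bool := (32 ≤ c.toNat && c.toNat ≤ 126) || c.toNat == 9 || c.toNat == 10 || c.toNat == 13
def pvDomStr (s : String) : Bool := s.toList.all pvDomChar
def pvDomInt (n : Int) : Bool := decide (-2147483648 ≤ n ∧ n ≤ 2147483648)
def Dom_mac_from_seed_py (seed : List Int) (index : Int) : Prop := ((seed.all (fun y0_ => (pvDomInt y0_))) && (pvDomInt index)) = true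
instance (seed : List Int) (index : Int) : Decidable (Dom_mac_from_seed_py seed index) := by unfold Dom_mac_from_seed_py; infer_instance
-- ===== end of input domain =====

-- B renders the result as one 12-hex-digit zero-padded string sliced into pairs instead of A's
-- int.to_bytes(6,"big") + per-byte "%02x" formatting, and accumulates in place without A's
-- defensive seed[:] copy (objective: alternative decomposition, same cost).

-- ===== PORT A =====
-- f"{b:02x}" for 0 ≤ b < 256 (exactly what iterating over a 6-byte bytes object yields):
-- two lowercase hex digits, high digit zero-padded.  Nat.digitChar is lowercase hex on 0..15.
def pvFmt02x (b : Nat) : List Char := [Nat.digitChar (b / 16), Nat.digitChar (b % 16)]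

-- mac_int.to_bytes(6, "big"): the six big-endian bytes of a nonnegative value < 2^48.
def pvToBytes6 (n : Nat) : List Nat :=
  [n / 2 ^ 40 % 256, n / 2 ^ 32 % 256, n / 2 ^ 24 % 256, n / 2 ^ 16 % 256, n / 2 ^ 8 % 256, n % 256]

def mac_from_seed_py (seed : List Int) (index : Int) : String :=
  let mac_bytes := PySem.List.slice seed none none   -- seed[:]
  -- Python's 'mac_int << 8' is exact multiplication by 256 (all ints, incl. negatives).
  let mac_int := mac_bytes.foldl (fun acc byte => PySem.Int.bor (acc * 256) byte) 0
  let mac_int := PySem.Int.mod (mac_int + index + 1) 281474976710656   -- % (1 << 48)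
  let mac := pvToBytes6 mac_int.toNat
  PySem.Str.join ":" (mac.map (fun b => String.ofList (pvFmt02x b)))

-- ===== PORT B =====
-- f"{v:012x}" for 0 ≤ v < 16^12: twelve lowercase hex digits, zero-padded (MSB first).
def pvPadHex : Nat → Nat → List Char
  | 0, _ => []
  | k + 1, n => pvPadHex k (n / 16) ++ [Nat.digitChar (n % 16)]

def mac_from_seed_py_alt (seed : List Int) (index : Int) : String :=
  -- for b in seed: v = (v << 8) | b   ('v << 8' is exact multiplication by 256)
  let v := seed.foldl (fun v b => PySem.Int.bor (v * 256) b) 0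
  let v := PySem.Int.mod (v + index + 1) 281474976710656   -- % (1 << 48)
  let s := pvPadHex 12 v.toNat
  PySem.Str.join ":"
    ((PySem.List.pyRange 0 12 2).map (fun i =>
      String.ofList (PySem.List.slice s (some i) (some (i + 2)))))

-- ===== PRECONDITION & SPEC =====
def Spec_mac_from_seed_py (seed : List Int) (index : Int) (out : String) : Prop := out = mac_from_seed_py_alt seed index
instance (seed : List Int) (index : Int) (out : String) : Decidable (Spec_mac_from_seed_py seed index out) := by unfold Spec_mac_from_seed_py; infer_instance

-- ===== CLAIM (what is proved, stated in full; the proofs are below) =====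
def Claim_equal_mac_from_seed_py : Prop := ∀ (seed : List Int) (index : Int), Dom_mac_from_seed_py seed index → Spec_mac_from_seed_py seed index (mac_from_seed_py seed index)

-- ===== LEMMAS AND PROOFS =====

theorem pvPair_eq (a b c d : Nat) (h1 : a = c) (h2 : b = d) :
    String.ofList [Nat.digitChar a, Nat.digitChar b] =
      String.ofList [Nat.digitChar c, Nat.digitChar d] := by
  rw [h1, h2]

-- B's sliced 12-digit rendering equals A's per-byte rendering, for values < 2^48.
set_option maxHeartbeats 2000000 in
theorem pvHex_eq (n : Nat) (hn : n < 281474976710656) :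
    (PySem.List.pyRange 0 12 2).map (fun i =>
        String.ofList (PySem.List.slice (pvPadHex 12 n) (some i) (some (i + 2)))) =
      (pvToBytes6 n).map (fun b => String.ofList (pvFmt02x b)) := by
  have hr : PySem.List.pyRange 0 12 2 = [0, 2, 4, 6, 8, 10] := by decide
  rw [hr]
  simp only [pvPadHex, pvToBytes6, pvFmt02x, List.map, PySem.List.slice,
    PySem.List.clampIdx, List.cons_append, List.nil_append]
  norm_num [List.take, List.drop, Int.toNat]
  and_intros <;> exact pvPair_eq _ _ _ _ (by omega) (by omega)

-- ===== VERDICT (by name: the statement is the Claim_ definition above) =====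
theorem mac_from_seed_py_spec : Claim_equal_mac_from_seed_py := by
  unfold Claim_equal_mac_from_seed_py
  intro seed index _
  unfold Spec_mac_from_seed_py mac_from_seed_py mac_from_seed_py_alt
  rw [PySem.List.slice_none_none]
  set M := seed.foldl (fun acc byte => PySem.Int.bor (acc * 256) byte) 0 + index + 1 with hM
  have hMB : seed.foldl (fun v b => PySem.Int.bor (v * 256) b) 0 + index + 1 = M := rfl
  have hlt : PySem.Int.mod M 281474976710656 < 281474976710656 :=
    PySem.Int.mod_lt M (by norm_num)
  have hge : 0 ≤ PySem.Int.mod M 281474976710656 :=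
    PySem.Int.mod_nonneg M (by norm_num)
  have hn : (PySem.Int.mod M 281474976710656).toNat < 281474976710656 := by omega
  show PySem.Str.join ":"
        ((pvToBytes6 (PySem.Int.mod M 281474976710656).toNat).map
          (fun b => String.ofList (pvFmt02x b))) =
      PySem.Str.join ":"
        ((PySem.List.pyRange 0 12 2).map (fun i =>
          String.ofList
            (PySem.List.slice (pvPadHex 12 (PySem.Int.mod M 281474976710656).toNat)
              (some i) (some (i + 2)))))
  rw [pvHex_eq _ hn]
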